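-- pv_equiv track=rewrite | github.com/erik-ingwersen-ey/peloptimize | src/pelopt/utils/sql_module.py | tagPIMStoDataLake_v1
-- ===== SOURCE A (Python) =====
-- def tagPIMStoDataLake_v1(tagList):
--     return [
--         t.replace("@", "_")
--         .replace(".", "_")
--         .replace(",", "_")
--         .replace("-", "_")
--         .replace("__", "_ME")
--         .replace("+", "MA")
--         + "__3600"
--         for t in tagList
--     ]
-- ===== SOURCE B (Python) =====
-- _TBL = {'@': '_', '.': '_', ',': '_', '-': '_', '+': 'MA'}
--
-- def tagPIMStoDataLake_v1(tagList):
--     out = []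
--     for t in tagList:
--         s = ''.join(_TBL.get(c, c) for c in t)
--         # one left-to-right scan replacing non-overlapping '__' with '_ME'
--         res = []
--         i = 0
--         n = len(s)
--         while i < n:
--             if s[i] == '_' and i + 1 < n and s[i + 1] == '_':
--                 res.append('_ME')
--                 i += 2
--             else:
--                 res.append(s[i])
--                 i += 1
--         out.append(''.join(res) + '__3600')
--     return out
-- ===== Notes on version B (the rewrite author's own statement) =====
-- stated objective: alternative
-- what changed: Five sequential whole-string str.replace scans are replaced by one table-driven character pass (dict of char substitutions, with '+' -> 'MA') followed by a single manual left-to-right index scan that rewrites non-overlapping '__' to '_ME'.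
import Mathlib
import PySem

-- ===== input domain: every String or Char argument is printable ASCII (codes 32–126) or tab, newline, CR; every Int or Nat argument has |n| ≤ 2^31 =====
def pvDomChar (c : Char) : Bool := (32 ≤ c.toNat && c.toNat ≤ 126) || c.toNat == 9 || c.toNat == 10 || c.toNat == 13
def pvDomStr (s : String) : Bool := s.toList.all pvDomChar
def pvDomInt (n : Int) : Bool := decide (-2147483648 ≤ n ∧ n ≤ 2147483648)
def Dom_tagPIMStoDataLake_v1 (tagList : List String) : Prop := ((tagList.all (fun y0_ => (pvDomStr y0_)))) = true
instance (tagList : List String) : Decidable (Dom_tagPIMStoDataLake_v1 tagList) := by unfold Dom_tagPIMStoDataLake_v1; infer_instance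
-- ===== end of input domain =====

-- B replaces the five sequential substring replaces by one table-driven character pass
-- plus a single manual left-to-right "__" -> "_ME" scan (alternative decomposition, same cost).


-- ===== PORT A =====
-- literal transliteration: five sequential str.replace calls per tag, then + "__3600"
def tagPIMStoDataLake_v1 (tagList : List String) : List String :=
  tagList.map (fun t =>
    PySem.Str.replace
      (PySem.Str.replace
        (PySem.Str.replace
          (PySem.Str.replace
            (PySem.Str.replace
              (PySem.Str.replace t "@" "_")
              "." "_")
            "," "_")
          "-" "_")
        "__" "_ME")
      "+" "MA"
    ++ "__3600")

-- ===== PORT B =====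
-- B (Source B): one table-driven character pass, then one manual left-to-right
-- scan replacing non-overlapping "__" by "_ME", then append "__3600".
def pvTranslate : List Char → List Char
  | [] => []
  | c :: t =>
      (if c = '@' ∨ c = '.' ∨ c = ',' ∨ c = '-' then ['_']
       else if c = '+' then ['M', 'A'] else [c]) ++ pvTranslate t

def pvMeRep : List Char → List Char
  | '_' :: '_' :: t => '_' :: 'M' :: 'E' :: pvMeRep t
  | c :: t => c :: pvMeRep t
  | [] => []

def tagPIMStoDataLake_v1_alt (tagList : List String) : List String :=
  tagList.map (fun t => String.ofList (pvMeRep (pvTranslate t.toList)) ++ "__3600")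

-- ===== PRECONDITION & SPEC =====
def Spec_tagPIMStoDataLake_v1 (tagList : List String) (out : List String) : Prop := out = tagPIMStoDataLake_v1_alt tagList
instance (tagList : List String) (out : List String) : Decidable (Spec_tagPIMStoDataLake_v1 tagList out) := by unfold Spec_tagPIMStoDataLake_v1; infer_instance

-- ===== CLAIM (what is proved, stated in full; the proofs are below) =====
def Claim_equal_tagPIMStoDataLake_v1 : Prop := ∀ (tagList : List String), Dom_tagPIMStoDataLake_v1 tagList → Spec_tagPIMStoDataLake_v1 tagList (tagPIMStoDataLake_v1 tagList)



-- ===== LEMMAS AND PROOFS =====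
-- per-character action of a single-char replace
def pvF1 (a : Char) (new : List Char) (c : Char) : List Char :=
  if c = a then new else [c]

theorem replace_go_single (a : Char) (new : List Char) :
    ∀ (l : List Char) (fuel : Nat) (acc : List Char), l.length ≤ fuel →
      PySem.Chars.replace.go [a] new fuel l acc = acc.reverse ++ l.flatMap (pvF1 a new) := by
  intro l
  induction l with
  | nil => intro fuel acc _; cases fuel <;> simp [PySem.Chars.replace.go]
  | cons c t ih =>
      intro fuel acc h
      cases fuel with
      | zero => simp at h
      | succ n =>
        simp only [PySem.Chars.replace.go]
        by_cases hc : c = a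
        · subst hc
          rw [if_pos (by simp [List.isPrefixOf])]
          simp only [List.length_cons, List.length_nil, List.drop_succ_cons, List.drop_zero]
          rw [ih _ _ (by simpa using h)]
          simp [pvF1]
        · rw [if_neg (by simp [List.isPrefixOf, Ne.symm hc])]
          rw [ih _ _ (by simpa using Nat.le_of_succ_le_succ h)]
          simp [pvF1, hc]

theorem replace_single (a : Char) (new cs : List Char) :
    PySem.Chars.replace cs [a] new = cs.flatMap (pvF1 a new) := by
  rw [PySem.Chars.replace]
  rw [if_neg (by simp)]
  simpa using replace_go_single a new cs cs.length [] le_rfl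


theorem pvMeRep_cons_ne (c : Char) (l : List Char) (hc : c ≠ '_') :
    pvMeRep (c :: l) = c :: pvMeRep l := by
  rw [pvMeRep.eq_def]
  split
  · rename_i h; simp at h; exact absurd h.1 hc
  · rename_i c' t' _ h; cases h; rfl
  · rename_i h; simp at h

theorem pvMeRep_cons₂ (c d : Char) (l : List Char) (hd : d ≠ '_') :
    pvMeRep (c :: d :: l) = c :: pvMeRep (d :: l) := by
  rw [pvMeRep.eq_def]
  split
  · rename_i h; simp at h; exact absurd h.2.1 hd
  · rename_i c' t' _ h; cases h; rfl
  · rename_i h; simp at h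

theorem pvMeRep_singleton (c : Char) : pvMeRep [c] = [c] := by
  rw [pvMeRep.eq_def]
  split
  · rename_i h; simp at h
  · rename_i c' t' _ h; cases h; rfl
  · rename_i h; simp at h

theorem replace_go_me :
    ∀ (fuel : Nat) (l acc : List Char), l.length ≤ fuel →
      PySem.Chars.replace.go ['_','_'] ['_','M','E'] fuel l acc = acc.reverse ++ pvMeRep l := by
  intro fuel
  induction fuel using Nat.strong_induction_on with
  | _ fuel ih =>
    intro l acc h
    match fuel, l with
    | 0, l =>
        have hl : l = [] := List.length_eq_zero_iff.mp (Nat.le_zero.mp h)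
        subst hl
        simp [PySem.Chars.replace.go, pvMeRep]
    | n+1, [] => simp [PySem.Chars.replace.go, pvMeRep]
    | n+1, c :: t =>
        simp only [PySem.Chars.replace.go]
        by_cases hpre : (['_','_'] : List Char).isPrefixOf (c :: t)
        · rw [if_pos hpre]
          obtain ⟨u, hu⟩ : ∃ u, c :: t = '_' :: '_' :: u := by
            cases t with
            | nil => simp [List.isPrefixOf] at hpre
            | cons d t' =>
              simp [List.isPrefixOf] at hpre
              exact ⟨t', by simp [← hpre.1, ← hpre.2]⟩
          rw [hu] at h ⊢
          simp only [List.length_cons, List.drop_succ_cons, List.length_nil, List.drop_zero]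
          rw [ih n (by omega) u (['_','M','E'].reverse ++ acc)
            (by simp only [List.length_cons] at h; omega)]
          simp [pvMeRep]
        · rw [if_neg hpre]
          have hnot : ¬ (c = '_' ∧ ∃ u, t = '_' :: u) := by
            rintro ⟨hc, u, hu⟩; subst hc; subst hu; simp [List.isPrefixOf] at hpre
          have step : pvMeRep (c :: t) = c :: pvMeRep t := by
            by_cases hc : c = '_'
            · cases t with
              | nil => exact pvMeRep_singleton c
              | cons d t' =>
                refine pvMeRep_cons₂ c d t' (fun hd => hnot ⟨hc, t', by rw [hd]⟩)
            · exact pvMeRep_cons_ne c t hc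
          rw [ih n (by omega) t (c :: acc)
            (by simp only [List.length_cons] at h; omega)]
          simp [step]

theorem replace_me (cs : List Char) :
    PySem.Chars.replace cs ['_','_'] ['_','M','E'] = pvMeRep cs := by
  rw [PySem.Chars.replace]
  rw [if_neg (by simp)]
  simpa using replace_go_me cs.length cs [] le_rfl

theorem translate_fuse (cs : List Char) :
    ((((cs.flatMap (pvF1 '@' ['_'])).flatMap (pvF1 '.' ['_'])).flatMap
        (pvF1 ',' ['_'])).flatMap (pvF1 '-' ['_'])).flatMap (pvF1 '+' ['M','A'])
      = pvTranslate cs := by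
  induction cs with
  | nil => simp [pvTranslate]
  | cons c t ih =>
      simp only [List.flatMap_cons, List.flatMap_append, pvTranslate, ← ih]
      congr 1
      by_cases h1 : c = '@' <;> by_cases h2 : c = '.' <;> by_cases h3 : c = ',' <;>
        by_cases h4 : c = '-' <;> by_cases h5 : c = '+' <;>
        simp_all [pvF1]

theorem pvMeRep_two (t : List Char) : pvMeRep ('_'::'_'::t) = '_'::'M'::'E'::pvMeRep t := rfl

theorem plus_meRep_comm (xs : List Char) :
    (pvMeRep xs).flatMap (pvF1 '+' ['M','A']) = pvMeRep (xs.flatMap (pvF1 '+' ['M','A'])) := by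
  induction xs using pvMeRep.induct with
  | case1 t ih =>
      rw [pvMeRep_two]
      simp only [List.flatMap_cons,
        show pvF1 '+' ['M','A'] '_' = ['_'] from rfl,
        show pvF1 '+' ['M','A'] 'M' = ['M'] from rfl,
        show pvF1 '+' ['M','A'] 'E' = ['E'] from rfl,
        List.cons_append, List.nil_append]
      rw [pvMeRep_two]
      simp [ih]
  | case2 c t hne ih =>
      have hstep : pvMeRep (c :: t) = c :: pvMeRep t := by
        by_cases hc : c = '_'
        · subst hc
          cases t with
          | nil => exact pvMeRep_singleton _
          | cons d t' =>
            refine pvMeRep_cons₂ _ d t' (fun hd => hne t' rfl (by rw [hd]))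
        · exact pvMeRep_cons_ne c t hc
      rw [hstep, List.flatMap_cons, List.flatMap_cons]
      by_cases hc : c = '+'
      · subst hc
        have hM : ∀ l, pvMeRep ('M' :: l) = 'M' :: pvMeRep l :=
          fun l => pvMeRep_cons_ne 'M' l (by decide)
        have hA : ∀ l, pvMeRep ('A' :: l) = 'A' :: pvMeRep l :=
          fun l => pvMeRep_cons_ne 'A' l (by decide)
        simp [pvF1, hM, hA, ih]
      · have hrhs : pvMeRep (c :: t.flatMap (pvF1 '+' ['M','A'])) = c :: pvMeRep (t.flatMap (pvF1 '+' ['M','A'])) := by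
          by_cases hu : c = '_'
          · subst hu
            cases t with
            | nil => simp [pvMeRep_singleton, pvMeRep]
            | cons d t' =>
              have hd : d ≠ '_' := fun hd => hne t' rfl (by rw [hd])
              rw [List.flatMap_cons]
              by_cases hdp : d = '+'
              · subst hdp
                rw [show pvF1 '+' ['M','A'] '+' = ['M','A'] from rfl]
                exact pvMeRep_cons₂ _ 'M' _ (by decide)
              · rw [show pvF1 '+' ['M','A'] d = [d] from if_neg hdp]
                exact pvMeRep_cons₂ _ d _ hd
          · exact pvMeRep_cons_ne c _ hu
        simp [pvF1, hc, hrhs, ih]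
  | case3 => simp [pvMeRep]

theorem per_tag (t : String) :
    PySem.Str.replace (PySem.Str.replace (PySem.Str.replace (PySem.Str.replace
      (PySem.Str.replace (PySem.Str.replace t "@" "_") "." "_") "," "_") "-" "_")
      "__" "_ME") "+" "MA" ++ "__3600"
    = String.ofList (pvMeRep (pvTranslate t.toList)) ++ "__3600" := by
  have h : (PySem.Str.replace (PySem.Str.replace (PySem.Str.replace (PySem.Str.replace
      (PySem.Str.replace (PySem.Str.replace t "@" "_") "." "_") "," "_") "-" "_")
      "__" "_ME") "+" "MA").toList = pvMeRep (pvTranslate t.toList) := by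
    simp only [PySem.Str.toList_replace,
      show ("@" : String).toList = ['@'] from rfl,
      show ("." : String).toList = ['.'] from rfl,
      show ("," : String).toList = [','] from rfl,
      show ("-" : String).toList = ['-'] from rfl,
      show ("_" : String).toList = ['_'] from rfl,
      show ("__" : String).toList = ['_','_'] from rfl,
      show ("_ME" : String).toList = ['_','M','E'] from rfl,
      show ("+" : String).toList = ['+'] from rfl,
      show ("MA" : String).toList = ['M','A'] from rfl]
    rw [replace_single, replace_single, replace_single, replace_single, replace_me,
      replace_single, plus_meRep_comm, translate_fuse]
  have h2 : PySem.Str.replace (PySem.Str.replace (PySem.Str.replace (PySem.Str.replace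
      (PySem.Str.replace (PySem.Str.replace t "@" "_") "." "_") "," "_") "-" "_")
      "__" "_ME") "+" "MA" = String.ofList (pvMeRep (pvTranslate t.toList)) :=
    String.toList_inj.mp (by rw [h]; simp)
  rw [h2]

-- ===== VERDICT =====
theorem tagPIMStoDataLake_v1_spec : Claim_equal_tagPIMStoDataLake_v1 := by
  intro tagList _
  unfold Spec_tagPIMStoDataLake_v1 tagPIMStoDataLake_v1 tagPIMStoDataLake_v1_alt
  exact List.map_congr_left (fun t _ => per_tag t)
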